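-- pv_equiv track=rewrite | github.com/jerbarnes/crosslingual_reordering | script/pos_reorderings_raw.py | enum_verbs
-- ===== SOURCE A (Python) =====
-- def get_slices (tagged_sents):
--     corpus_verbs = []
--     good_corpus_verbs = []
--     for sentence in tagged_sents:
--         sent_enumeration = []
--         sent_enumeration.extend(list(enumerate(sentence)))
--         sent_verbs = []
--         for pos, tupl in sent_enumeration:
--             tag = tupl[-1]
--             if tag == 'VERB':
--                 sent_verbs.append(pos)
--                 for i in range(pos+1, len(sent_enumeration)):
--                     next_tag = sent_enumeration[i][-1][-1]
--                     if next_tag == 'VERB':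
--                         new_pos = sent_enumeration[i][0]
--                         if new_pos-1 in sent_verbs:
--                             sent_verbs.append(new_pos)
--         nice_sent_verbs = sorted(set(sent_verbs))
--         corpus_verbs.append(nice_sent_verbs)
--     for lista in corpus_verbs:
--         good_lista = []
--         for position in lista:
--             if position-1 in lista:
--                 good_lista.append(position)
--             if position+1 in lista:
--                 good_lista.append(position)
--         good_corpus_verbs.append(sorted(set(good_lista)))
--     return good_corpus_verbs
--
-- def enum_verbs (tagged_sents):
--     enumeration_sents = []
--     for element in list(enumerate(tagged_sents)):
--         enumeration_sents.append(element)
--     enumeration_slices = []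
--     for element in list(enumerate(get_slices(tagged_sents))):
--         enumeration_slices.append(element)
--     return enumeration_sents, enumeration_slices
-- ===== SOURCE B (Python) =====
-- def enum_verbs(tagged_sents):
--     enumeration_sents = list(enumerate(tagged_sents))
--     enumeration_slices = []
--     for j, sentence in enumerate(tagged_sents):
--         v = [tag == 'VERB' for _, tag in sentence]
--         n = len(v)
--         keep = [i for i in range(n)
--                 if v[i] and ((i > 0 and v[i - 1]) or (i + 1 < n and v[i + 1]))]
--         enumeration_slices.append((j, keep))
--     return enumeration_sents, enumeration_slices
-- ===== Notes on version B (the rewrite author's own statement) =====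
-- stated objective: simpler
-- what changed: A's per-verb forward rescan plus two sorted(set(...)) passes per sentence are replaced by a single pass that keeps each VERB index having a VERB neighbour.
import Mathlib
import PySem

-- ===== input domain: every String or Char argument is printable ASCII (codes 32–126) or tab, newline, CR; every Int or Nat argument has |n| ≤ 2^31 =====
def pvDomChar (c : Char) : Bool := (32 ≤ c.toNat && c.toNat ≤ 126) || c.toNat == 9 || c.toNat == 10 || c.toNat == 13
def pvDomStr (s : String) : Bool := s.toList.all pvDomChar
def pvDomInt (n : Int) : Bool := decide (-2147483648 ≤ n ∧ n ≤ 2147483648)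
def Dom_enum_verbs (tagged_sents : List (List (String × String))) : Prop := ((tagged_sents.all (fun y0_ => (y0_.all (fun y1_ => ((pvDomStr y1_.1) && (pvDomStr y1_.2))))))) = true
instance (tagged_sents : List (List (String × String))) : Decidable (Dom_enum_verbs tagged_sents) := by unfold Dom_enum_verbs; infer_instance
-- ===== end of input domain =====

-- B replaces A's per-verb forward rescans and double sorted(set(...)) passes by one
-- direct neighbour check per token (same return value; objective: simpler).


-- ===== PORT A =====
-- inner loop body: 'for i in range(pos+1, len(sent_enumeration)): …' (the none case of
-- sent_enumeration[i] is unreachable: i is drawn from range(pos+1, len))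
def pvInnerA (sent_enumeration : List (Int × (String × String))) (sv : List Int) (i : Int) : List Int :=
  match PySem.List.pyGet? sent_enumeration i with
  | none => sv
  | some e =>
    let next_tag := e.2.2
    if next_tag == "VERB" then
      let new_pos := e.1
      if sv.contains (new_pos - 1) then sv ++ [new_pos] else sv
    else sv

-- 'for pos, tupl in sent_enumeration: …' building sent_verbs
def pvOuterA (sent_enumeration : List (Int × (String × String))) (sv : List Int) (pt : Int × (String × String)) : List Int :=
  let tag := pt.2.2
  if tag == "VERB" then
    (PySem.List.pyRange (pt.1 + 1) (sent_enumeration.length : Int) 1).foldl (pvInnerA sent_enumeration) (sv ++ [pt.1])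
  else sv

-- nice_sent_verbs = sorted(set(sent_verbs)) for one sentence
def pvNiceA (sentence : List (String × String)) : List Int :=
  let sent_enumeration := PySem.List.enumerate sentence
  PySem.List.sorted (PySem.Set.ofList (sent_enumeration.foldl (pvOuterA sent_enumeration) [])) (fun x => x) false

-- second pass of get_slices over one lista
def pvGoodA (lista : List Int) : List Int :=
  let good_lista := lista.foldl (fun g position =>
    let g := if lista.contains (position - 1) then g ++ [position] else g
    if lista.contains (position + 1) then g ++ [position] else g) []
  PySem.List.sorted (PySem.Set.ofList good_lista) (fun x => x) false

def pvGetSlicesA (tagged_sents : List (List (String × String))) : List (List Int) :=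
  let corpus_verbs := tagged_sents.foldl (fun acc sentence => acc ++ [pvNiceA sentence]) []
  corpus_verbs.foldl (fun acc lista => acc ++ [pvGoodA lista]) []

def enum_verbs (tagged_sents : List (List (String × String))) : (List (Int × (List (String × String)))) × (List (Int × List Int)) :=
  let enumeration_sents := (PySem.List.enumerate tagged_sents).foldl (fun a e => a ++ [e]) []
  let enumeration_slices := (PySem.List.enumerate (pvGetSlicesA tagged_sents)).foldl (fun a e => a ++ [e]) []
  (enumeration_sents, enumeration_slices)

-- ===== PORT B =====
-- one linear pass: keep i with v[i] and a VERB neighbour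
def pvAltSent (sentence : List (String × String)) : List Int :=
  let v := sentence.map (fun p => p.2 == "VERB")
  let n : Int := (v.length : Int)
  (PySem.List.pyRange 0 n 1).filter (fun i =>
    PySem.List.pyGetD v i false &&
      ((decide (0 < i) && PySem.List.pyGetD v (i - 1) false) ||
       (decide (i + 1 < n) && PySem.List.pyGetD v (i + 1) false)))

def enum_verbs_alt (tagged_sents : List (List (String × String))) : (List (Int × (List (String × String)))) × (List (Int × List Int)) :=
  (PySem.List.enumerate tagged_sents,
   (PySem.List.enumerate tagged_sents).map (fun e => (e.1, pvAltSent e.2)))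

-- ===== PRECONDITION & SPEC =====
def Spec_enum_verbs (tagged_sents : List (List (String × String))) (out : (List (Int × (List (String × String)))) × (List (Int × List Int))) : Prop := out = enum_verbs_alt tagged_sents
instance (tagged_sents : List (List (String × String))) (out : (List (Int × (List (String × String)))) × (List (Int × List Int))) : Decidable (Spec_enum_verbs tagged_sents out) := by unfold Spec_enum_verbs; infer_instance

-- ===== CLAIM (what is proved, stated in full; the proofs are below) =====
def Claim_equal_enum_verbs : Prop := ∀ (tagged_sents : List (List (String × String))), Dom_enum_verbs tagged_sents → Spec_enum_verbs tagged_sents (enum_verbs tagged_sents)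

-- ===== LEMMAS AND PROOFS =====

-- 'sentence is VERB at position k' (k : Int), phrased through enumerate
def pvVM (sentence : List (String × String)) (k : Int) : Prop :=
  ∃ e ∈ PySem.List.enumerate sentence, e.1 = k ∧ e.2.2 = "VERB"

theorem pv_mem_enumerate {α : Type} (xs : List α) (s : Int) (p : Int × α) :
    p ∈ PySem.List.enumerate xs s ↔ ∃ i : Nat, ∃ h : i < xs.length, p = (s + i, xs[i]) := by
  induction xs generalizing s with
  | nil => simp [PySem.List.enumerate]
  | cons x xs ih =>
    rw [PySem.List.enumerate_cons]
    constructor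
    · intro hp
      rcases List.mem_cons.1 hp with h | h
      · exact ⟨0, by simp, by simpa using h⟩
      · rcases (ih (s + 1)).1 h with ⟨i, hi, rfl⟩
        refine ⟨i + 1, by simpa using hi, ?_⟩
        rw [List.getElem_cons_succ]
        congr 1
        push_cast; ring
    · rintro ⟨i, hi, rfl⟩
      cases i with
      | zero => simp
      | succ i =>
        refine List.mem_cons_of_mem _ ((ih (s + 1)).2 ⟨i, by simpa using hi, ?_⟩)
        rw [List.getElem_cons_succ]
        congr 1
        push_cast; ring

theorem pv_mem_of_pyGet? {α : Type} {xs : List α} {i : Int} {x : α}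
    (h : PySem.List.pyGet? xs i = some x) : x ∈ xs := by
  unfold PySem.List.pyGet? at h
  rcases Option.bind_eq_some_iff.1 h with ⟨k, _, hk⟩
  exact List.mem_of_getElem? hk

-- the inner/outer folds only append
theorem pv_inner_mono (se : List (Int × (String × String))) (sv : List Int) (i : Int) :
    sv ⊆ pvInnerA se sv i := by
  unfold pvInnerA
  cases PySem.List.pyGet? se i with
  | none => exact fun _ h => h
  | some e => intro y hy; dsimp only; split_ifs <;> simp [hy]

theorem pv_foldl_mono {α : Type} (f : List Int → α → List Int)
    (hf : ∀ s x, s ⊆ f s x) : ∀ (l : List α) (s : List Int), s ⊆ List.foldl f s l := by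
  intro l
  induction l with
  | nil => intro s; exact fun _ h => h
  | cons x xs ih => intro s; exact fun y hy => ih (f s x) (hf s x hy)

theorem pv_outer_mono (se : List (Int × (String × String))) (sv : List Int) (pt : Int × (String × String)) :
    sv ⊆ pvOuterA se sv pt := by
  unfold pvOuterA
  dsimp only; split_ifs
  · intro y hy
    exact pv_foldl_mono (pvInnerA se) (pv_inner_mono se) _ _ (by simp [hy])
  · exact fun _ h => h

-- every element the folds ever append is a VERB position of se
def pvVMse (se : List (Int × (String × String))) (k : Int) : Prop :=
  ∃ e ∈ se, e.1 = k ∧ e.2.2 = "VERB"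

theorem pv_inner_sound (se : List (Int × (String × String))) (sv : List Int) (i : Int) (y : Int)
    (hy : y ∈ pvInnerA se sv i) : y ∈ sv ∨ pvVMse se y := by
  unfold pvInnerA at hy
  rcases he : PySem.List.pyGet? se i with _ | e
  · rw [he] at hy; exact Or.inl hy
  · rw [he] at hy
    dsimp only at hy
    split_ifs at hy with h1 h2
    · rcases List.mem_append.1 hy with h | h
      · exact Or.inl h
      · refine Or.inr ⟨e, pv_mem_of_pyGet? he, by simp at h; omega, by simpa using h1⟩
    · exact Or.inl hy
    · exact Or.inl hy

theorem pv_foldl_sound {α : Type} (f : List Int → α → List Int) (P : Int → Prop)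
    (hf : ∀ s x y, y ∈ f s x → y ∈ s ∨ P y) :
    ∀ (l : List α) (s : List Int) (y : Int), y ∈ List.foldl f s l → y ∈ s ∨ P y := by
  intro l
  induction l with
  | nil => intro s y hy; exact Or.inl hy
  | cons x xs ih =>
    intro s y hy
    rcases ih (f s x) y hy with h | h
    · exact hf s x y h
    · exact Or.inr h

theorem pv_outer_sound (se : List (Int × (String × String))) (sv : List Int) (pt : Int × (String × String)) (y : Int)
    (hy : y ∈ pvOuterA se sv pt) (hpt : pt ∈ se) : y ∈ sv ∨ pvVMse se y := by
  unfold pvOuterA at hy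
  dsimp only at hy
  split_ifs at hy with htag
  · rcases pv_foldl_sound (pvInnerA se) (pvVMse se) (pv_inner_sound se) _ _ _ hy with h | h
    · rcases List.mem_append.1 h with h | h
      · exact Or.inl h
      · exact Or.inr ⟨pt, hpt, by simp at h; omega, by simpa using htag⟩
    · exact Or.inr h
  · exact Or.inl hy

theorem pv_foldl_sound_mem {α : Type} (f : List Int → α → List Int) (P : Int → Prop) :
    ∀ (l : List α), (∀ s, ∀ x ∈ l, ∀ y, y ∈ f s x → y ∈ s ∨ P y) →
    ∀ (s : List Int) (y : Int), y ∈ List.foldl f s l → y ∈ s ∨ P y := by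
  intro l
  induction l with
  | nil => intro _ s y hy; exact Or.inl hy
  | cons x xs ih =>
    intro hf s y hy
    rcases ih (fun s x hx => hf s x (List.mem_cons_of_mem _ hx)) (f s x) y hy with h | h
    · exact hf s x (List.mem_cons_self ..) y h
    · exact Or.inr h

-- characterisation of the first pass: membership in sent_verbs = being a VERB position
theorem pv_sent_verbs_mem (sentence : List (String × String)) (y : Int) :
    y ∈ (PySem.List.enumerate sentence).foldl (pvOuterA (PySem.List.enumerate sentence)) [] ↔
      pvVM sentence y := by
  constructor
  · intro hy
    rcases pv_foldl_sound_mem (pvOuterA (PySem.List.enumerate sentence))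
        (pvVMse (PySem.List.enumerate sentence)) (PySem.List.enumerate sentence)
        (fun s x hx y hy => pv_outer_sound _ s x y hy hx) [] y hy with h | h
    · simp at h
    · exact h
  · rintro ⟨e, he, hek, htag⟩
    rcases List.append_of_mem he with ⟨l1, l2, hsplit⟩
    have h1 : e.1 ∈ pvOuterA (PySem.List.enumerate sentence)
        (List.foldl (pvOuterA (PySem.List.enumerate sentence)) [] l1) e := by
      unfold pvOuterA
      dsimp only
      rw [if_pos (by simpa using htag)]
      exact pv_foldl_mono _ (pv_inner_mono _) _ _ (by simp)
    have h2 : e.1 ∈ List.foldl (pvOuterA (PySem.List.enumerate sentence)) [] (PySem.List.enumerate sentence) := by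
      rw [hsplit] at h1 ⊢
      rw [List.foldl_append, List.foldl_cons]
      exact pv_foldl_mono _ (pv_outer_mono _) l2 _ h1
    rwa [hek] at h2

-- membership in pvNiceA
theorem pv_nice_mem (sentence : List (String × String)) (y : Int) :
    y ∈ pvNiceA sentence ↔ pvVM sentence y := by
  unfold pvNiceA
  rw [PySem.List.mem_sorted, PySem.Set.mem_ofList, pv_sent_verbs_mem]

-- index form of pvVM
theorem pv_VM_iff (sentence : List (String × String)) (k : Int) :
    pvVM sentence k ↔ 0 ≤ k ∧ k < (sentence.length : Int) ∧
      PySem.List.pyGetD (sentence.map (fun p => p.2 == "VERB")) k false = true := by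
  constructor
  · rintro ⟨e, he, hek, htag⟩
    rcases (pv_mem_enumerate sentence 0 e).1 he with ⟨i, hi, rfl⟩
    simp only at hek
    have h0 : (0 : Int) ≤ k := by omega
    have h1 : k < (sentence.length : Int) := by omega
    refine ⟨h0, h1, ?_⟩
    rw [PySem.List.pyGetD_eq_getElem _ _ h0 (by simpa using h1)]
    have hk : k.toNat = i := by omega
    simp only [List.getElem_map, hk]
    simpa using htag
  · rintro ⟨h0, h1, hget⟩
    have hk : k.toNat < sentence.length := by omega
    rw [PySem.List.pyGetD_eq_getElem _ _ h0 (by simpa using h1)] at hget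
    simp only [List.getElem_map, beq_iff_eq] at hget
    exact ⟨((k.toNat : Int), sentence[k.toNat]),
      (pv_mem_enumerate sentence 0 _).2 ⟨k.toNat, hk, by simp⟩, by simp; omega, hget⟩

-- block appended by the second pass for one position
def pvH (lista : List Int) (p : Int) : List Int :=
  (if lista.contains (p - 1) then [p] else []) ++ (if lista.contains (p + 1) then [p] else [])

theorem pv_mem_pvH (lista : List Int) (p x : Int) :
    x ∈ pvH lista p ↔ x = p ∧ ((p - 1) ∈ lista ∨ (p + 1) ∈ lista) := by
  unfold pvH
  split_ifs with h1 h2 <;> simp_all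

-- the per-sentence equality: A's two passes agree with B's single pass
theorem pv_sent_eq (sentence : List (String × String)) :
    pvGoodA (pvNiceA sentence) = pvAltSent sentence := by
  unfold pvGoodA
  have hfold : (pvNiceA sentence).foldl (fun g position =>
      let g := if (pvNiceA sentence).contains (position - 1) then g ++ [position] else g
      if (pvNiceA sentence).contains (position + 1) then g ++ [position] else g) [] =
      (pvNiceA sentence).flatMap (pvH (pvNiceA sentence)) := by
    rw [show (fun g position =>
      let g := if (pvNiceA sentence).contains (position - 1) then g ++ [position] else g
      if (pvNiceA sentence).contains (position + 1) then g ++ [position] else g) =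
      (fun g p => g ++ pvH (pvNiceA sentence) p) from funext fun g => funext fun p => by
        dsimp only [pvH]; split_ifs <;> simp]
    rw [PySem.List.foldl_append_eq_flatMap]
    simp
  rw [hfold]
  -- B's list is strictly increasing
  have hpw : (pvAltSent sentence).Pairwise (· < ·) := by
    unfold pvAltSent
    exact (PySem.List.pairwise_lt_pyRange_one 0 _).filter _
  have hnd : (pvAltSent sentence).Nodup := hpw.imp (fun h => ne_of_lt h)
  -- membership agreement
  have hmem : ∀ x : Int, x ∈ pvAltSent sentence ↔
      x ∈ PySem.Set.ofList ((pvNiceA sentence).flatMap (pvH (pvNiceA sentence))) := by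
    intro x
    rw [PySem.Set.mem_ofList, List.mem_flatMap]
    unfold pvAltSent
    simp only [List.mem_filter, PySem.List.mem_pyRange_one, Bool.and_eq_true, Bool.or_eq_true,
      decide_eq_true_eq]
    constructor
    · rintro ⟨⟨hx0, hxn⟩, hv, hnb⟩
      simp only [List.length_map] at hxn
      refine ⟨x, (pv_nice_mem sentence x).2 ((pv_VM_iff sentence x).2 ⟨hx0, by simpa using hxn, hv⟩),
        (pv_mem_pvH _ _ _).2 ⟨rfl, ?_⟩⟩
      rcases hnb with ⟨hgt, hb⟩ | ⟨hlt, hb⟩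
      · exact Or.inl ((pv_nice_mem sentence _).2 ((pv_VM_iff sentence _).2
          ⟨by omega, by omega, hb⟩))
      · exact Or.inr ((pv_nice_mem sentence _).2 ((pv_VM_iff sentence _).2
          ⟨by omega, by simp only [List.length_map] at hlt; omega, hb⟩))
    · rintro ⟨p, hp, hpx⟩
      rcases (pv_mem_pvH _ _ _).1 hpx with ⟨rfl, hnb⟩
      rcases (pv_VM_iff sentence x).1 ((pv_nice_mem sentence x).1 hp) with ⟨hx0, hxn, hv⟩
      refine ⟨⟨hx0, by simpa using hxn⟩, hv, ?_⟩
      rcases hnb with h | h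
      · rcases (pv_VM_iff sentence _).1 ((pv_nice_mem sentence _).1 h) with ⟨ha, _, hb⟩
        exact Or.inl ⟨by omega, hb⟩
      · rcases (pv_VM_iff sentence _).1 ((pv_nice_mem sentence _).1 h) with ⟨_, ha, hb⟩
        exact Or.inr ⟨by simp only [List.length_map]; omega, hb⟩
  exact PySem.List.sorted_eq_of_perm_of_pairwise_lt _ _ _
    ((List.perm_ext_iff_of_nodup hnd (PySem.Set.nodup_ofList _)).2 hmem) hpw

theorem pv_enumerate_map {α β : Type} (f : α → β) (xs : List α) (s : Int) :
    PySem.List.enumerate (xs.map f) s = (PySem.List.enumerate xs s).map (fun e => (e.1, f e.2)) := by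
  induction xs generalizing s with
  | nil => simp [PySem.List.enumerate]
  | cons x xs ih => simp [PySem.List.enumerate_cons, ih]

-- ===== VERDICT (by name: the statement is the Claim_ definition above) =====
theorem enum_verbs_spec : Claim_equal_enum_verbs := by
  intro tagged_sents _
  show enum_verbs tagged_sents = enum_verbs_alt tagged_sents
  unfold enum_verbs enum_verbs_alt pvGetSlicesA
  simp only [PySem.List.foldl_append_singleton, PySem.List.foldl_append_singleton_eq_map,
    List.nil_append]
  rw [pv_enumerate_map, pv_enumerate_map]
  simp [List.map_map, Function.comp, pv_sent_eq]
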